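-- pv_equiv track=rewrite | github.com/qianht123/qht202512 | qht_chuli_jianlishili/buju/constraint/symmetry.py | _build_net_to_device_map
-- ===== SOURCE A (Python) =====
-- from typing import List, Dict, Optional, Set, Tuple
--
-- def _build_net_to_device_map(devices: Dict) -> Dict[str, List[Tuple[str, str]]]:
--     """
--     辅助函数：构建网络拓扑映射
--     Returns: { 'net_name': [('M1', 'D'), ('M2', 'S'), ...], ... }
--     """
--     net_map = {}
--     for dev_name, dev_data in devices.items():
--         for pin in dev_data.get("pins", []):
--             net_name = pin.get("net")
--             pin_name = pin.get("name")
--             if net_name: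
--                 if net_name not in net_map:
--                     net_map[net_name] = []
--                 net_map[net_name].append((dev_name, pin_name))
--     return net_map
-- ===== SOURCE B (Python) =====
-- def _build_net_to_device_map(devices):
--     # Flatten once into (net, dev, pin) triples, then build each net's bucket
--     # by filtering that stream, with keys in first-occurrence order.
--     triples = [(pin.get("net"), dev_name, pin.get("name"))
--                for dev_name, dev_data in devices.items()
--                for pin in dev_data.get("pins", [])
--                if pin.get("net")]
--     nets = dict.fromkeys(net for net, _, _ in triples)
--     return {net: [(dev, p) for n, dev, p in triples if n == net] for net in nets}
-- ===== Notes on version B (the rewrite author's own statement) =====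
-- stated objective: alternative
-- what changed: B replaces A's single pass of per-pin dict-bucket insertion by flatten-to-triples, ordered key dedup (dict.fromkeys) and one filtering comprehension per net.
import Mathlib
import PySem

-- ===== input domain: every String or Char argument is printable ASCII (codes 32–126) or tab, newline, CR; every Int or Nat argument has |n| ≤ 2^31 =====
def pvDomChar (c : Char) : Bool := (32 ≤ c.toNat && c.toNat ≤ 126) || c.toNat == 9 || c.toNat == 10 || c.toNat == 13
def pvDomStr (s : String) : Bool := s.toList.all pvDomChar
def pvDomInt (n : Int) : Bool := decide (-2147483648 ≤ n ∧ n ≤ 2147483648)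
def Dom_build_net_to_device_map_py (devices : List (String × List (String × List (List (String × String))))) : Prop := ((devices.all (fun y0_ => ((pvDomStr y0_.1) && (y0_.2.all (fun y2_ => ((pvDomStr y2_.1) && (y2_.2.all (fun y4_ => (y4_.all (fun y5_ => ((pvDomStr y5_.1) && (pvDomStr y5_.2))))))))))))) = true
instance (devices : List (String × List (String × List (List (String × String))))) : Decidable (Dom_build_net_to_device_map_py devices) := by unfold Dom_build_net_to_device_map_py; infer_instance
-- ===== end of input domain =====

-- B flattens all pins to (net, dev, pin) triples once, then builds each net's bucket by filtering
-- that stream over the deduped nets, instead of A's per-pin dict-bucket insertion (alternative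
-- decomposition, same result).


-- ===== PORT A =====
def build_net_to_device_map_py (devices : List (String × List (String × List (List (String × String))))) : List (String × List (String × String)) :=
  (devices.foldl (fun (net_map : PySem.Dict String (List (String × String))) dev =>
    ((PySem.Dict.mk dev.2).getD "pins" []).foldl (fun net_map pin =>
      let net_name? := (PySem.Dict.mk pin).get? "net"
      -- pin.get("name"): exact under Pre_, which guarantees the "name" key is present
      -- whenever the 'if net_name' branch below runs (otherwise A's tuple holds None).
      let pin_name := (PySem.Dict.mk pin).getD "name" ""
      match net_name? with
      | some net_name =>
        if net_name ≠ "" then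
          let m1 := if net_map.contains net_name then net_map else net_map.insert net_name []
          m1.modify net_name [] (fun l => l ++ [(dev.1, pin_name)])
        else net_map
      | none => net_map) net_map) PySem.Dict.empty).items

-- ===== PORT B =====
-- the triples comprehension of Source B
def pvTriples (devices : List (String × List (String × List (List (String × String))))) : List (String × String × String) :=
  devices.flatMap (fun dev =>
    ((PySem.Dict.mk dev.2).getD "pins" []).filterMap (fun pin =>
      match (PySem.Dict.mk pin).get? "net" with
      | some n => if n ≠ "" then some (n, dev.1, (PySem.Dict.mk pin).getD "name" "") else none
      | none => none))

def build_net_to_device_map_py_alt (devices : List (String × List (String × List (List (String × String))))) : List (String × List (String × String)) :=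
  let triples := pvTriples devices
  -- dict.fromkeys on the nets (ordered dedup), then one filtering comprehension per net;
  -- the resulting dict comprehension over these distinct keys is this assoc list.
  (PySem.List.dedup (triples.map (·.1))).map (fun net =>
    (net, (triples.filter (fun t => t.1 == net)).map (·.2)))

-- ===== PRECONDITION & SPEC =====
-- Pre_ excludes association lists with duplicate dictionary keys at any level (a Python dict
-- cannot carry them, so A's behaviour on them is undefined under the encoding) and pins whose
-- "net" is a nonempty string but which lack a "name" key (there A puts None, not a string, in
-- the returned tuple, leaving the declared return type).
def Pre_build_net_to_device_map_py (devices : List (String × List (String × List (List (String × String))))) : Prop :=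
  (devices.map (·.1)).Nodup ∧ ∀ dev ∈ devices, (dev.2.map (·.1)).Nodup ∧
    ∀ pin ∈ (PySem.Dict.mk dev.2).getD "pins" [], (pin.map (·.1)).Nodup ∧
      (((PySem.Dict.mk pin).get? "net").getD "" ≠ "" → ((PySem.Dict.mk pin).get? "name").isSome)
instance (devices : List (String × List (String × List (List (String × String))))) : Decidable (Pre_build_net_to_device_map_py devices) := by unfold Pre_build_net_to_device_map_py; infer_instance

def pvWitness_build_net_to_device_map_py : (List (String × List (String × List (List (String × String))))) :=
  [("M1", [("pins", [[("net", "n1"), ("name", "D")], [("net", "n2"), ("name", "S")]])]),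
   ("M2", [("pins", [[("net", "n1"), ("name", "G")], [("name", "B")]])])]

def Spec_build_net_to_device_map_py (devices : List (String × List (String × List (List (String × String))))) (out : List (String × List (String × String))) : Prop := out = build_net_to_device_map_py_alt devices
instance (devices : List (String × List (String × List (List (String × String))))) (out : List (String × List (String × String))) : Decidable (Spec_build_net_to_device_map_py devices out) := by unfold Spec_build_net_to_device_map_py; infer_instance

-- ===== CLAIM (what is proved, stated in full; the proofs are below) =====
def Claim_equal_build_net_to_device_map_py : Prop := ∀ (devices : List (String × List (String × List (List (String × String))))), Dom_build_net_to_device_map_py devices → Pre_build_net_to_device_map_py devices → Spec_build_net_to_device_map_py devices (build_net_to_device_map_py devices)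

-- ===== LEMMAS AND PROOFS =====

-- A's "if missing: d[k]=[]; d[k].append" step collapses to one modify.
theorem pv_setdefault_modify (d : PySem.Dict String (List (String × String))) (k : String)
    (f : List (String × String) → List (String × String)) :
    (if d.contains k then d else d.insert k []).modify k [] f = d.modify k [] f := by
  by_cases h : d.contains k
  · simp [h]
  · simp only [h, if_neg, Bool.false_eq_true, not_false_eq_true]
    show (d.insert k []).insert k (f ((d.insert k []).getD k [])) = d.insert k (f (d.getD k []))
    rw [PySem.Dict.getD_insert_self, PySem.Dict.insert_insert_self,
      PySem.Dict.getD_of_not_contains d [] (by simpa using h)]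

theorem pv_foldl_filterMap {α β γ : Type} (l : List α) (f : α → Option β) (g : γ → β → γ) (i : γ) :
    (l.filterMap f).foldl g i
      = l.foldl (fun acc a => match f a with | some b => g acc b | none => acc) i := by
  induction l generalizing i with
  | nil => rfl
  | cons x xs ih => cases hx : f x <;> simp [hx, ih]

-- A's nested loops are the single modify-append loop over the flattened triple stream.
theorem pv_A_eq_foldl_triples (devices : List (String × List (String × List (List (String × String))))) :
    build_net_to_device_map_py devices
      = ((pvTriples devices).foldl
          (fun d t => d.modify t.1 [] (fun l => l ++ [t.2])) PySem.Dict.empty).items := by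
  unfold build_net_to_device_map_py pvTriples
  rw [List.foldl_flatMap]
  congr 1
  apply PySem.List.foldl_congr_mem
  intro d dev _
  rw [pv_foldl_filterMap]
  apply PySem.List.foldl_congr_mem
  intro m pin _
  cases hn : (PySem.Dict.mk pin).get? "net" with
  | none => rfl
  | some n =>
    by_cases he : n = "" <;> simp [he, pv_setdefault_modify]

-- ===== VERDICT (by name: the statement is the Claim_ definition above) =====
theorem build_net_to_device_map_py_spec : Claim_equal_build_net_to_device_map_py := by
  intro devices _ _
  show build_net_to_device_map_py devices = build_net_to_device_map_py_alt devices
  rw [pv_A_eq_foldl_triples]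
  unfold build_net_to_device_map_py_alt
  have hnd : ((pvTriples devices).foldl
      (fun d t => d.modify t.1 [] (fun l => l ++ [t.2])) PySem.Dict.empty).keys.Nodup := by
    exact PySem.Dict.nodup_keys_foldl_modify_key (pvTriples devices) (·.1) []
      (fun _ t => fun l => l ++ [t.2]) PySem.Dict.empty PySem.Dict.nodup_keys_empty
  rw [PySem.Dict.items_eq_map_keys _ hnd []]
  have hkeys : ((pvTriples devices).foldl
      (fun d t => d.modify t.1 [] (fun l => l ++ [t.2])) PySem.Dict.empty).keys
      = PySem.List.dedup ((pvTriples devices).map (·.1)) := by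
    rw [PySem.Dict.keys_foldl_modify_key]
    simp [PySem.Dict.keys_empty, PySem.List.dedup_eq_ofList]
    rfl
  rw [hkeys]
  apply List.map_congr_left
  intro net _
  rw [PySem.Dict.getD_foldl_modify_append]
  simp [PySem.Dict.getD_empty]
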